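-- pv_equiv track=rewrite | github.com/Cesar514/cosimo-idai-test | robotics_maze/src/geometry.py | _iter_wall_runs
-- ===== SOURCE A (Python) =====
-- from typing import Iterable, Sequence
--
-- def _iter_wall_runs(
--     values: Sequence[bool], merge_collinear: bool
-- ) -> list[tuple[int, int]]:
--     """Return `[start, end)` index pairs for wall segments marked True."""
--     if not merge_collinear:
--         return [(index, index + 1) for index, has_wall in enumerate(values) if has_wall]
--
--     runs: list[tuple[int, int]] = []
--     run_start: int | None = None
--     for index, has_wall in enumerate(values):
--         if has_wall and run_start is None:
--             run_start = index
--         if not has_wall and run_start is not None: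
--             runs.append((run_start, index))
--             run_start = None
--     if run_start is not None:
--         runs.append((run_start, len(values)))
--     return runs
-- ===== SOURCE B (Python) =====
-- from typing import Sequence
--
--
-- def _iter_wall_runs(
--     values: Sequence[bool], merge_collinear: bool
-- ) -> list[tuple[int, int]]:
--     """Return `[start, end)` index pairs for wall segments marked True."""
--     if not merge_collinear:
--         return [(i, i + 1) for i, v in enumerate(values) if v]
--     # Boundary detection: a run starts where True follows a (virtual) False,
--     # and ends right after a True followed by a (virtual) False; zip pairs them.
--     values = list(values)
--     prv = [False] + values
--     nxt = values + [False]
--     starts = [i for i in range(len(values)) if values[i] and not prv[i]]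
--     ends = [i + 1 for i in range(len(values)) if values[i] and not nxt[i + 1]]
--     return list(zip(starts, ends))
-- ===== Notes on version B (the rewrite author's own statement) =====
-- stated objective: alternative
-- what changed: The run_start sentinel state machine is replaced by boundary detection: two staged passes compute run starts (True preceded by a virtual False) and run ends (True followed by a virtual False) independently, and zip pairs them.
import Mathlib
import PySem

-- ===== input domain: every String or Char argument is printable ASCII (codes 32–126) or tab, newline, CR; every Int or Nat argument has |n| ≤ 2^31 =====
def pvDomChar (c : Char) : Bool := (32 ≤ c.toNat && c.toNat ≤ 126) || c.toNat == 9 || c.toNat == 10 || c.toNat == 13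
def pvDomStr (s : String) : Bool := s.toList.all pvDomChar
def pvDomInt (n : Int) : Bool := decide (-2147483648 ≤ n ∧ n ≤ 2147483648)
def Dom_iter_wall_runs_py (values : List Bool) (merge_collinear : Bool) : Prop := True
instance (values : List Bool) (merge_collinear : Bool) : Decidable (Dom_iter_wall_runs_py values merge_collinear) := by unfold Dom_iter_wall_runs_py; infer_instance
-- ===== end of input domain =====

-- B replaces A's run_start sentinel state machine with boundary detection: two staged passes
-- compute run starts and run ends independently and zip pairs them; alternative, same cost.

-- ===== PORT A =====
-- A's for-loop over enumerate(values) with state (runs, run_start): one element per step.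
def pvALoop (l : List Bool) (i : Int) (runs : List (Int × Int)) (run_start : Option Int) :
    List (Int × Int) × Option Int :=
  match l with
  | [] => (runs, run_start)
  | has_wall :: rest =>
    -- `if has_wall and run_start is None: run_start = index`
    let rs1 := if has_wall ∧ run_start = none then some i else run_start
    -- `if not has_wall and run_start is not None: runs.append((run_start, index)); run_start = None`
    if has_wall then
      pvALoop rest (i + 1) runs rs1
    else
      match rs1 with
      | some s => pvALoop rest (i + 1) (runs ++ [(s, i)]) none
      | none => pvALoop rest (i + 1) runs none

def iter_wall_runs_py (values : List Bool) (merge_collinear : Bool) : List (Int × Int) :=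
  if merge_collinear = false then
    -- `[(index, index + 1) for index, has_wall in enumerate(values) if has_wall]`
    (PySem.List.enumerate values).foldl
      (fun acc p => if p.2 then acc ++ [(p.1, p.1 + 1)] else acc) []
  else
    match pvALoop values 0 [] none with
    | (runs, some s) => runs ++ [(s, (values.length : Int))]  -- trailing `if run_start is not None`
    | (runs, none) => runs

-- ===== PORT B =====
def iter_wall_runs_py_alt (values : List Bool) (merge_collinear : Bool) : List (Int × Int) :=
  if merge_collinear = false then
    -- `[(i, i + 1) for i, v in enumerate(values) if v]`
    (PySem.List.enumerate values).filterMap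
      (fun p => if p.2 then some (p.1, p.1 + 1) else none)
  else
    -- prv = [False] + values ; nxt = values + [False]
    let prv := false :: values
    let nxt := values ++ [false]
    -- every index drawn from range(len(values)) is in range, so `getD _ false` is Python's l[i]
    let starts := (List.range values.length).filterMap
      (fun i => if values.getD i false && !(prv.getD i false) then some ((i : Int)) else none)
    let ends := (List.range values.length).filterMap
      (fun i => if values.getD i false && !(nxt.getD (i + 1) false) then some ((i : Int) + 1) else none)
    starts.zip ends

-- ===== PRECONDITION & SPEC =====
def Spec_iter_wall_runs_py (values : List Bool) (merge_collinear : Bool) (out : List (Int × Int)) : Prop := out = iter_wall_runs_py_alt values merge_collinear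
instance (values : List Bool) (merge_collinear : Bool) (out : List (Int × Int)) : Decidable (Spec_iter_wall_runs_py values merge_collinear out) := by unfold Spec_iter_wall_runs_py; infer_instance

-- ===== CLAIM =====
def Claim_equal_iter_wall_runs_py : Prop := ∀ (values : List Bool) (merge_collinear : Bool), Dom_iter_wall_runs_py values merge_collinear → Spec_iter_wall_runs_py values merge_collinear (iter_wall_runs_py values merge_collinear)

-- ===== LEMMAS AND PROOFS =====

-- Canonical run decomposition carrying A's optional open-run state.
def pvRuns (l : List Bool) (i : Int) (st : Option Int) : List (Int × Int) :=
  match l with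
  | [] => match st with | some s => [(s, i)] | none => []
  | true :: t => pvRuns t (i + 1) (some (st.getD i))
  | false :: t =>
    match st with
    | some s => (s, i) :: pvRuns t (i + 1) none
    | none => pvRuns t (i + 1) none

-- A's result once the loop is done, given the total length endpoint e.
def pvFinish (e : Int) : List (Int × Int) × Option Int → List (Int × Int)
  | (runs, some s) => runs ++ [(s, e)]
  | (runs, none) => runs

lemma pvALoop_runs (l : List Bool) :
    ∀ (i : Int) (runs : List (Int × Int)) (st : Option Int),
      pvFinish (i + l.length) (pvALoop l i runs st) = runs ++ pvRuns l i st := by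
  induction l with
  | nil => intro i runs st; cases st <;> simp [pvALoop, pvFinish, pvRuns]
  | cons v t ih =>
    intro i runs st
    have harith : i + ((t.length : Int) + 1) = (i + 1) + t.length := by ring
    cases v with
    | true =>
      cases st with
      | none =>
        simp only [pvALoop, List.length_cons]
        norm_num
        rw [harith, ih (i + 1) runs (some i)]
        simp [pvRuns]
      | some s =>
        simp only [pvALoop, List.length_cons]
        norm_num
        rw [if_neg (Option.some_ne_none s), harith, ih (i + 1) runs (some s)]
        simp [pvRuns]
    | false =>
      cases st with
      | none =>
        simp only [pvALoop, List.length_cons]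
        norm_num
        rw [harith, ih (i + 1) runs none]
        simp [pvRuns]
      | some s =>
        simp only [pvALoop, List.length_cons]
        norm_num
        rw [harith, ih (i + 1) (runs ++ [(s, i)]) none]
        simp [pvRuns]

-- Recursive descriptions of B's two boundary passes.
def pvS (p : Bool) (l : List Bool) (i : Int) : List Int :=
  match l with
  | [] => []
  | v :: t => (if v && !p then [i] else []) ++ pvS v t (i + 1)

def pvE (l : List Bool) (i : Int) : List Int :=
  match l with
  | [] => []
  | v :: t => (if v && !(t.headD false) then [i + 1] else []) ++ pvE t (i + 1)

-- The central zip invariant: starts zipped with ends is the run decomposition.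
lemma pvZip_runs (l : List Bool) :
    (∀ i : Int, (pvS false l i).zip (pvE l i) = pvRuns l i none) ∧
    (∀ (i s : Int) (t : List Bool), l = true :: t →
      (s :: pvS true l i).zip (pvE l i) = pvRuns l i (some s)) := by
  induction l with
  | nil => exact ⟨fun i => by simp [pvS, pvE, pvRuns], fun i s t h => by cases h⟩
  | cons v t ih =>
    constructor
    · intro i
      cases v with
      | false =>
        simp only [pvS, pvE, pvRuns]
        simpa using ih.1 (i + 1)
      | true =>
        cases t with
        | nil => simp [pvS, pvE, pvRuns]
        | cons w t' =>
          cases w with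
          | false =>
            simp only [pvS, pvE, pvRuns, List.headD]
            have h1 := ih.1 (i + 1)
            simp only [pvS, pvE, pvRuns] at h1 ⊢
            simpa using h1
          | true =>
            have hq := ih.2 (i + 1) i t' rfl
            simp only [pvS, pvE, pvRuns, List.headD] at hq ⊢
            simpa using hq
    · intro i s t0 h
      cases h
      cases t with
      | nil => simp [pvS, pvE, pvRuns]
      | cons w t' =>
        cases w with
        | false =>
          simp only [pvS, pvE, pvRuns, List.headD]
          have h1 := ih.1 (i + 1)
          simp only [pvS, pvE, pvRuns] at h1 ⊢
          simpa using h1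
        | true =>
          have hq := ih.2 (i + 1) s t' rfl
          simp only [pvS, pvE, pvRuns, List.headD] at hq ⊢
          simpa using hq

-- B's range/getD starts pass equals pvS (generalized over the virtual previous value and offset).
lemma pvStarts_eq (l : List Bool) : ∀ (p : Bool) (c : Int),
    (List.range l.length).filterMap
      (fun i => if l.getD i false && !((p :: l).getD i false) then some ((i : Int) + c) else none)
      = pvS p l c := by
  induction l with
  | nil => intro p c; simp [pvS]
  | cons v t ih =>
    intro p c
    rw [List.length_cons, List.range_succ_eq_map, List.filterMap_cons, List.filterMap_map]
    have htail :
        (List.range t.length).filterMap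
          ((fun i => if (v :: t).getD i false && !((p :: v :: t).getD i false) then some ((i : Int) + c) else none) ∘ Nat.succ)
          = pvS v t (c + 1) := by
      rw [← ih v (c + 1)]
      apply List.filterMap_congr
      intro i _
      simp only [Function.comp, List.getD_cons_succ]
      push_cast
      ring_nf
    cases hv : v && !p with
    | false =>
      simp only [List.getD_cons_zero, hv]
      rw [htail]
      simp [pvS, hv]
    | true =>
      simp only [List.getD_cons_zero, hv, if_true]
      rw [htail]
      simp [pvS, hv]

-- B's range/getD ends pass equals pvE (generalized over the offset).
lemma pvEnds_eq (l : List Bool) : ∀ (c : Int),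
    (List.range l.length).filterMap
      (fun i => if l.getD i false && !((l ++ [false]).getD (i + 1) false) then some ((i : Int) + c + 1) else none)
      = pvE l c := by
  induction l with
  | nil => intro c; simp [pvE]
  | cons v t ih =>
    intro c
    rw [List.length_cons, List.range_succ_eq_map, List.filterMap_cons, List.filterMap_map]
    have hhead : ((v :: t) ++ [false]).getD 1 false = t.headD false := by
      cases t <;> rfl
    have htail :
        (List.range t.length).filterMap
          ((fun i => if (v :: t).getD i false && !(((v :: t) ++ [false]).getD (i + 1) false) then some ((i : Int) + c + 1) else none) ∘ Nat.succ)
          = pvE t (c + 1) := by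
      simp only [List.cons_append]
      rw [← ih (c + 1)]
      apply List.filterMap_congr
      intro i _
      simp only [Function.comp, List.getD_cons_succ]
      push_cast
      ring_nf
    simp only [List.cons_append] at htail
    cases hv : v && !(t.headD false) with
    | false =>
      simp only [List.getD_cons_zero, List.cons_append] at hhead ⊢
      rw [show (0:Nat) + 1 = 1 from rfl] at *
      simp only [hhead, hv]
      rw [htail]
      cases v <;> cases t <;> simp_all [pvE]
    | true =>
      simp only [List.getD_cons_zero, List.cons_append] at hhead ⊢
      rw [show (0:Nat) + 1 = 1 from rfl] at *
      simp only [hhead, hv]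
      rw [htail]
      cases v <;> cases t <;> simp_all [pvE]

lemma pvFold_filterMap (l : List (Int × Bool)) (acc : List (Int × Int)) :
    l.foldl (fun acc p => if p.2 then acc ++ [(p.1, p.1 + 1)] else acc) acc =
      acc ++ l.filterMap (fun p => if p.2 then some (p.1, p.1 + 1) else none) := by
  induction l generalizing acc with
  | nil => simp
  | cons p t ih =>
    cases hp : p.2 <;> simp [List.foldl, hp, ih]

-- ===== VERDICT =====
theorem iter_wall_runs_py_spec : Claim_equal_iter_wall_runs_py := by
  intro values merge_collinear _
  unfold Spec_iter_wall_runs_py iter_wall_runs_py iter_wall_runs_py_alt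
  cases merge_collinear with
  | false => simp [pvFold_filterMap]
  | true =>
    simp only [Bool.true_eq_false, if_false]
    have hstarts : (List.range values.length).filterMap
        (fun i => if values.getD i false && !((false :: values).getD i false) then some ((i : Int)) else none)
        = pvS false values 0 := by
      rw [← pvStarts_eq values false 0]
      apply List.filterMap_congr
      intro i _
      simp
    have hends : (List.range values.length).filterMap
        (fun i => if values.getD i false && !((values ++ [false]).getD (i + 1) false) then some ((i : Int) + 1) else none)
        = pvE values 0 := by
      rw [← pvEnds_eq values 0]
      apply List.filterMap_congr
      intro i _
      simp
    rw [hstarts, hends, (pvZip_runs values).1 0]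
    have h := pvALoop_runs values 0 [] none
    simp only [zero_add, List.nil_append] at h
    rw [← h]
    cases hA : pvALoop values 0 [] none with
    | mk runs rs => cases rs <;> simp [pvFinish]
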